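-- pv_equiv track=rewrite | github.com/kingjeongkong/DataStructure-Algorithm | Algorithms/완전탐색/일곱난쟁이(백준).py | solution
-- ===== SOURCE A (Python) =====
-- def solution(input):
--     dwarf_num = len(input)
--     sum = 0
--     for i in input:
--         sum += i
--
--     for i in range(dwarf_num):
--         for j in range(i+1, dwarf_num):
--             liar1 = input[i]
--             liar2 = input[j]
--             if (sum - liar1 - liar2) == 100:
--                 input.remove(liar1)
--                 input.remove(liar2)
--                 return sorted(input)
-- ===== SOURCE B (Python) =====
-- def solution(input):
--     # One pass with a value->remaining-count table instead of A's nested index loops.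
--     # Return value only: A mutates its argument (removes the two liars); B does not.
--     target = sum(input) - 100
--     counts = {}
--     for v in input:
--         counts[v] = counts.get(v, 0) + 1
--     for v in input:
--         counts[v] -= 1
--         c = target - v
--         if counts.get(c, 0) > 0:
--             rest = sorted(input)
--             rest.remove(v)
--             rest.remove(c)
--             return rest
--     return None
-- ===== Notes on version B (the rewrite author's own statement) =====
-- stated objective: faster
-- what changed: Replaces A's O(n^2) nested index loops with a single pass over a value-to-remaining-count hash table (two-sum), then removes the pair from the sorted copy instead of mutating and re-sorting.
import Mathlib
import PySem

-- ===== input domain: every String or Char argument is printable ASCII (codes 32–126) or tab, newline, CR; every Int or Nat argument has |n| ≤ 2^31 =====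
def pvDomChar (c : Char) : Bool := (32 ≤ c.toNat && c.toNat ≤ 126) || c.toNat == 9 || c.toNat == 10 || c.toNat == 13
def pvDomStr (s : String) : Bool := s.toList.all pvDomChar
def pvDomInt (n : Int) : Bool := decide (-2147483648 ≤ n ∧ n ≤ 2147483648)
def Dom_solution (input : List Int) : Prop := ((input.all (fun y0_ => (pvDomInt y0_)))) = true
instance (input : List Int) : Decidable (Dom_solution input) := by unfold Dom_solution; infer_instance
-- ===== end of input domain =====

-- B replaces A's O(n^2) nested index loops by a one-pass remaining-count table (two-sum);
-- equivalence is about the RETURN value only: A mutates its argument (removes the two liars), B does not.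

-- ===== PORT A =====
-- inner loop: 'for j in range(i+1, dwarf_num): …'
def solA_inner (input : List Int) (s : Int) (i : Int) : List Int → Option (List Int)
  | [] => none
  | j :: js =>
    match PySem.List.pyGet? input i, PySem.List.pyGet? input j with
    | some liar1, some liar2 =>
      if s - liar1 - liar2 = 100 then
        match PySem.List.remove? input liar1 with
        | some l1 =>
          match PySem.List.remove? l1 liar2 with
          | some l2 => some (PySem.List.sorted l2 (fun x => x))
          | none => none        -- unreachable: liar2 is still present after removing liar1
        | none => none          -- unreachable: liar1 = input[i] ∈ input
      else solA_inner input s i js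
    | _, _ => none              -- unreachable: i, j produced by range(len(input))

-- outer loop: 'for i in range(dwarf_num): …'
def solA_outer (input : List Int) (s : Int) : List Int → Option (List Int)
  | [] => none
  | i :: is =>
    match solA_inner input s i (PySem.List.pyRange (i + 1) (input.length : Int)) with
    | some r => some r
    | none => solA_outer input s is

def solution (input : List Int) : Option (List Int) :=
  let dwarf_num := input.length
  let s := input.foldl (fun acc i => acc + i) 0
  solA_outer input s (PySem.List.pyRange 0 (dwarf_num : Int))

-- ===== PORT B =====
-- second loop of Source B: counts[v] -= 1; c = target - v; if counts.get(c, 0) > 0: …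
def solB_loop (target : Int) (orig : List Int) : PySem.Dict Int Int → List Int → Option (List Int)
  | _, [] => none
  | counts, v :: rest =>
    let counts' := counts.insert v (counts.getD v 0 - 1)
    let c := target - v
    if counts'.getD c 0 > 0 then
      match PySem.List.remove? (PySem.List.sorted orig (fun x => x)) v with
      | some r1 =>
        match PySem.List.remove? r1 c with
        | some r2 => some r2
        | none => none          -- unreachable: c is still present after removing v
      | none => none            -- unreachable: v ∈ sorted(input)
    else solB_loop target orig counts' rest

def solution_alt (input : List Int) : Option (List Int) :=
  let target := input.sum - 100
  let counts := input.foldl (fun d v => d.insert v (d.getD v 0 + 1)) PySem.Dict.empty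
  solB_loop target input counts input

-- ===== PRECONDITION & SPEC =====
def Spec_solution (input : List Int) (out : Option (List Int)) : Prop := out = solution_alt input
instance (input : List Int) (out : Option (List Int)) : Decidable (Spec_solution input out) := by unfold Spec_solution; infer_instance

-- ===== CLAIM (what is proved, stated in full; the proofs are below) =====
def Claim_equal_solution : Prop := ∀ (input : List Int), Dom_solution input → Spec_solution input (solution input)

-- ===== LEMMAS AND PROOFS =====

-- the first element v of l (scanning left to right) such that t - v occurs later in l
def firstLiar (t : Int) : List Int → Option Int
  | [] => none
  | v :: rest => if (t - v) ∈ rest then some v else firstLiar t rest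

-- A's found-branch value
def foundA (input : List Int) (v c : Int) : Option (List Int) :=
  match PySem.List.remove? input v with
  | some l1 =>
    match PySem.List.remove? l1 c with
    | some l2 => some (PySem.List.sorted l2 (fun x => x))
    | none => none
  | none => none

-- B's found-branch value
def foundB (orig : List Int) (v c : Int) : Option (List Int) :=
  match PySem.List.remove? (PySem.List.sorted orig (fun x => x)) v with
  | some r1 =>
    match PySem.List.remove? r1 c with
    | some r2 => some r2
    | none => none
  | none => none

lemma firstLiar_some (t : Int) (l : List Int) (v : Int) (h : firstLiar t l = some v) :
    v ∈ l ∧ (t - v) ∈ l.erase v := by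
  induction l with
  | nil => simp [firstLiar] at h
  | cons x rest ih =>
    by_cases hx : (t - x) ∈ rest
    · simp [firstLiar, hx] at h
      subst h
      refine ⟨List.mem_cons_self, ?_⟩
      simpa using hx
    · simp [firstLiar, hx] at h
      obtain ⟨hv, hc⟩ := ih h
      by_cases hxv : x = v
      · subst hxv
        refine ⟨List.mem_cons_self, ?_⟩
        rw [List.erase_cons_head]
        exact List.mem_of_mem_erase hc
      · refine ⟨List.mem_cons_of_mem _ hv, ?_⟩
        rw [List.erase_cons_tail (by simpa using hxv)]
        exact List.mem_cons_of_mem _ hc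

lemma foundA_eq (input : List Int) (v c : Int) (hv : v ∈ input) (hc : c ∈ input.erase v) :
    foundA input v c = some (PySem.List.sorted ((input.erase v).erase c) (fun x => x)) := by
  unfold foundA
  simp only [PySem.List.remove?_eq_some_erase input v hv,
    PySem.List.remove?_eq_some_erase (input.erase v) c hc]

lemma foundB_eq (input : List Int) (v c : Int) (hv : v ∈ input) (hc : c ∈ input.erase v) :
    foundB input v c = some (PySem.List.sorted ((input.erase v).erase c) (fun x => x)) := by
  have hperm : (PySem.List.sorted input (fun x => x)).Perm input :=
    PySem.List.sorted_perm input (fun x => x) false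
  have hv' : v ∈ PySem.List.sorted input (fun x => x) := hperm.mem_iff.mpr hv
  have hpe : ((PySem.List.sorted input (fun x => x)).erase v).Perm (input.erase v) :=
    hperm.erase v
  have hc' : c ∈ (PySem.List.sorted input (fun x => x)).erase v := hpe.mem_iff.mpr hc
  unfold foundB
  simp only [PySem.List.remove?_eq_some_erase _ v hv',
    PySem.List.remove?_eq_some_erase _ c hc']
  congr 1
  symm
  apply PySem.List.sorted_id_eq_of_perm_of_pairwise
  · exact (hpe.erase c).trans (List.Perm.refl _)
  · exact List.Pairwise.sublist (List.Sublist.trans List.erase_sublist List.erase_sublist)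
      (PySem.List.sorted_pairwise input (fun x => x))

lemma count_take_drop (m : Nat) (l : List Int) (a : Int) :
    l.count a = (l.take m).count a + (l.drop m).count a := by
  conv_lhs => rw [← List.take_append_drop m l]
  exact List.count_append

lemma mem_erase_of_two_idx (l : List Int) (k m : Nat) (hkm : k < m) (hm : m < l.length) :
    l[m] ∈ l.erase (l[k]'(lt_trans hkm hm)) := by
  have hk : k < l.length := lt_trans hkm hm
  by_cases h : l[m] = l[k]
  · -- the value occurs at both k and m, so it survives erasing one copy
    have h1 : l[k] ∈ l.take m := by
      have hk' : k < (l.take m).length := by simp [List.length_take]; omega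
      have : (l.take m)[k] = l[k] := List.getElem_take
      rw [← this]; exact List.getElem_mem hk'
    have h2 : l[k] ∈ l.drop m := by
      have hm' : 0 < (l.drop m).length := by simp [List.length_drop]; omega
      have h0 : (l.drop m)[0] = l[m] := by simp [List.getElem_drop]
      rw [← h, ← h0]; exact List.getElem_mem hm'
    have hcnt : 2 ≤ l.count l[k] := by
      have hcc := count_take_drop m l (l[k]'hk)
      have c1 : 0 < (l.take m).count l[k] := List.count_pos_iff.mpr h1
      have c2 : 0 < (l.drop m).count l[k] := List.count_pos_iff.mpr h2
      omega
    have : 0 < (l.erase l[k]).count l[k] := by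
      rw [List.count_erase_self]; omega
    rw [h]; exact List.count_pos_iff.mp this
  · exact (List.mem_erase_of_ne h).mpr (List.getElem_mem hm)

lemma mem_drop_exists {c : Int} {l : List Int} {i : Nat} (h : c ∈ l.drop i) :
    ∃ j, i ≤ j ∧ ∃ (hj : j < l.length), l[j] = c := by
  obtain ⟨p, hp, hpe⟩ := List.mem_iff_getElem.mp h
  have hlen : (l.drop i).length = l.length - i := List.length_drop
  refine ⟨i + p, by omega, by omega, ?_⟩
  have hg : (l.drop i)[p] = l[i + p] := List.getElem_drop
  rw [← hg]; exact hpe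

-- remaining-count invariant: B's loop finds the first liar
lemma solB_loop_eq (target : Int) (orig : List Int) :
    ∀ (rest : List Int) (counts : PySem.Dict Int Int),
      (∀ x : Int, counts.getD x 0 = (rest.count x : Int)) →
      solB_loop target orig counts rest =
        match firstLiar target rest with
        | none => none
        | some v => foundB orig v (target - v) := by
  intro rest
  induction rest with
  | nil => intro counts _; simp [solB_loop, firstLiar]
  | cons v rest ih =>
    intro counts hinv
    have hinv' : ∀ x : Int,
        (counts.insert v (counts.getD v 0 - 1)).getD x 0 = (rest.count x : Int) := by
      intro x
      rw [PySem.Dict.getD_insert]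
      have hv := hinv v
      have hx := hinv x
      rw [List.count_cons] at hv hx
      split_ifs with hxv
      · subst hxv; simp at hv; omega
      · simp [Ne.symm hxv] at hx; omega
    by_cases hc : (target - v) ∈ rest
    · have hpos : (counts.insert v (counts.getD v 0 - 1)).getD (target - v) 0 > 0 := by
        rw [hinv' (target - v)]
        exact_mod_cast List.count_pos_iff.mpr hc
      simp only [solB_loop, firstLiar, if_pos hc, if_pos hpos]
      rfl
    · have hnpos : ¬ (counts.insert v (counts.getD v 0 - 1)).getD (target - v) 0 > 0 := by
        rw [hinv' (target - v)]
        simp [List.count_eq_zero_of_not_mem hc]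
      simp only [solB_loop, firstLiar, if_neg hc, if_neg hnpos]
      exact ih _ hinv'

-- A's inner loop over j ∈ range(m, n) finds target - input[k] in input[m:]
lemma solA_inner_eq (input : List Int) (s : Int) (k : Nat) (hk : k < input.length) :
    ∀ (d m : Nat), input.length - m ≤ d → k < m →
      solA_inner input s (k : Int) (PySem.List.pyRange (m : Int) (input.length : Int)) =
        if (s - 100 - input[k]) ∈ input.drop m then foundA input input[k] (s - 100 - input[k])
        else none := by
  intro d
  induction d with
  | zero =>
    intro m hd _
    have hmn : input.length ≤ m := by omega
    rw [PySem.List.pyRange_one_eq_nil (by exact_mod_cast hmn)]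
    rw [List.drop_eq_nil_of_le hmn]
    simp [solA_inner]
  | succ d ih =>
    intro m hd hkm
    by_cases hmn : m < input.length
    · rw [PySem.List.pyRange_one_cons (by exact_mod_cast hmn)]
      have hcast : (m : Int) + 1 = ((m + 1 : Nat) : Int) := by push_cast; ring
      rw [hcast]
      simp only [solA_inner, PySem.List.pyGet?_natCast,
        List.getElem?_eq_getElem hk, List.getElem?_eq_getElem hmn]
      by_cases heq : s - input[k] - input[m] = 100
      · have hval : input[m] = s - 100 - input[k] := by omega
        have hmem : (s - 100 - input[k]) ∈ input.drop m := by
          rw [List.drop_eq_getElem_cons hmn, ← hval]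
          exact List.mem_cons_self
        rw [if_pos heq, if_pos hmem, hval]
        rfl
      · have hne : s - 100 - input[k] ≠ input[m] := by omega
        have hiff : (s - 100 - input[k]) ∈ input.drop m ↔
            (s - 100 - input[k]) ∈ input.drop (m + 1) := by
          rw [List.drop_eq_getElem_cons hmn, List.mem_cons]
          exact ⟨fun h => h.resolve_left hne, Or.inr⟩
        rw [if_neg heq, ih (m + 1) (by omega) (by omega)]
        simp only [hiff]
    · have hmn' : input.length ≤ m := by omega
      rw [PySem.List.pyRange_one_eq_nil (by exact_mod_cast hmn')]
      rw [List.drop_eq_nil_of_le hmn']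
      simp [solA_inner]

-- A's outer loop over i ∈ range(k, n) is firstLiar on input[k:]
lemma solA_outer_eq (input : List Int) (s : Int) :
    ∀ (d k : Nat), input.length - k ≤ d →
      solA_outer input s (PySem.List.pyRange (k : Int) (input.length : Int)) =
        match firstLiar (s - 100) (input.drop k) with
        | none => none
        | some v => foundA input v (s - 100 - v) := by
  intro d
  induction d with
  | zero =>
    intro k hd
    have hkn : input.length ≤ k := by omega
    rw [PySem.List.pyRange_one_eq_nil (by exact_mod_cast hkn)]
    rw [List.drop_eq_nil_of_le hkn]
    simp [solA_outer, firstLiar]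
  | succ d ih =>
    intro k hd
    by_cases hkn : k < input.length
    · rw [PySem.List.pyRange_one_cons (by exact_mod_cast hkn)]
      have hcast : (k : Int) + 1 = ((k + 1 : Nat) : Int) := by push_cast; ring
      simp only [solA_outer, hcast]
      rw [solA_inner_eq input s k hkn (input.length - (k + 1)) (k + 1) (by omega) (by omega)]
      rw [List.drop_eq_getElem_cons hkn]
      by_cases hc : (s - 100 - input[k]) ∈ input.drop (k + 1)
      · -- the inner loop found the pair: foundA is some (…)
        obtain ⟨j, hkj, hj, hjv⟩ := mem_drop_exists hc
        have hcm : (s - 100 - input[k]) ∈ input.erase input[k] := by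
          rw [← hjv]; exact mem_erase_of_two_idx input k j (by omega) hj
        rw [show firstLiar (s - 100) (input[k] :: List.drop (k + 1) input) = some input[k] by
          simp [firstLiar, hc]]
        rw [if_pos hc]
        simp [foundA_eq input input[k] _ (List.getElem_mem hkn) hcm]
      · rw [show firstLiar (s - 100) (input[k] :: List.drop (k + 1) input) =
            firstLiar (s - 100) (List.drop (k + 1) input) by simp [firstLiar, hc]]
        rw [if_neg hc]
        exact ih (k + 1) (by omega)
    · have hkn' : input.length ≤ k := by omega
      rw [PySem.List.pyRange_one_eq_nil (by exact_mod_cast hkn')]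
      rw [List.drop_eq_nil_of_le hkn']
      simp [solA_outer, firstLiar]

-- ===== VERDICT (by name: the statement is the Claim_ definition above) =====
theorem solution_spec : Claim_equal_solution := by
  intro input _
  unfold Spec_solution solution solution_alt
  have hsum : input.foldl (fun acc i => acc + i) 0 = input.sum :=
    (List.sum_eq_foldl (l := input)).symm
  simp only [hsum]
  have hA := solA_outer_eq input input.sum input.length 0 (by omega)
  rw [show ((0 : Nat) : Int) = (0 : Int) by norm_num] at hA
  rw [hA]
  have hinv : ∀ x : Int,
      (input.foldl (fun d v => d.insert v (d.getD v 0 + 1)) PySem.Dict.empty).getD x 0 =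
        (input.count x : Int) := by
    intro x
    rw [PySem.Dict.getD_foldl_insert_add_one, PySem.Dict.getD_empty]
    ring
  rw [solB_loop_eq (input.sum - 100) input input _ hinv]
  simp only [List.drop_zero]
  cases hfl : firstLiar (input.sum - 100) input with
  | none => rfl
  | some v =>
    obtain ⟨hv, hc⟩ := firstLiar_some _ _ _ hfl
    show foundA input v (input.sum - 100 - v) = foundB input v (input.sum - 100 - v)
    rw [foundA_eq input v _ hv hc, foundB_eq input v _ hv hc]
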